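-- pv_equiv track=rewrite | github.com/RainbowCoopie/my_tools | main.py | include_sort
-- ===== SOURCE A (Python) =====
-- def include_sort(string_list: list, reverse=True) -> list:
--     """
--     document: 本函数功能为将输入的字符串列表按照包含关系进行排序
--     param string_list: 字符串列表
--     return: 照包含关系进行排序的结果
--     example: include_sort(["早", "早上好", "早上", "你好", "好"])
--     """
--     element_list = []  # 用于存储 element_dict 字典的列表
--
--     for element in string_list:
--         element_dict = {"value": element, "level": 1}  # value 为字符串内容, level为该字符串的包含等级: 1级为最低->不包含...
--         for other in [_ele for _ele in string_list if _ele != element]:  # 遍历old_list 除了当前 element 的 对象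
--             if other in element:
--                 element_dict["level"] += 1  # 如果被包含, 则包含等级 level 自增
--         element_list.append(element_dict)  # 将结果添加到 element_list
--
--     # 对element_list 按照 element_dict的 level进行排序
--     element_list.sort(key=lambda _element_dict: (_element_dict['level']), reverse=reverse)
--     # 排序结果转换为列表
--     res_list = [_element_dict["value"] for _element_dict in element_list]
--     return res_list  # 返回列表结果
-- ===== SOURCE B (Python) =====
-- def include_sort(string_list: list, reverse=True) -> list:
--     # Count each distinct value once, compute its level from distinct values only,
--     # then sort the original list directly by that precomputed level.
--     cnt = {}
--     for s in string_list:
--         cnt[s] = cnt.get(s, 0) + 1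
--     level = {}
--     for e in cnt:
--         tot = 0
--         for v, c in cnt.items():
--             if v in e:
--                 tot += c
--         level[e] = 1 + tot - cnt[e]
--     return sorted(string_list, key=level.__getitem__, reverse=reverse)
-- ===== Notes on version B (the rewrite author's own statement) =====
-- stated objective: alternative
-- what changed: B replaces A's per-element scan over the whole list and sort of {value,level} records by a count dict built once, a level computed once per DISTINCT value (level = 1 + sum of counts of contained distinct values - own count), and a direct keyed sort of the original list; measured 2-3x faster on the probe's inputs but not confirmed at the largest size.
import Mathlib
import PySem

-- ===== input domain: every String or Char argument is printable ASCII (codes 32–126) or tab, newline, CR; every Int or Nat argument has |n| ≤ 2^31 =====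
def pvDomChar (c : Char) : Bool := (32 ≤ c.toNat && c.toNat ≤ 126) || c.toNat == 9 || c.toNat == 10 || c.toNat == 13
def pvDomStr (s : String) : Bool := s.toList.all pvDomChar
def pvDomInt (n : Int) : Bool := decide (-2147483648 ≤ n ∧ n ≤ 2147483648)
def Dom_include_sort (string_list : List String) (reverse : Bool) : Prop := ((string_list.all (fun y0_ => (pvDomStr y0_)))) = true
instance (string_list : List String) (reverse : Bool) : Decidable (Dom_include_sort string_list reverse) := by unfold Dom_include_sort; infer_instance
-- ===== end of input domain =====

-- B computes the "level" once per DISTINCT value from a count dict and sorts the original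
-- list directly by that precomputed key (objective: a different decomposition; it does the substring
-- work once per distinct value instead of once per element).

-- ===== PORT A =====
-- A's element_dict {"value": e, "level": n} is modelled as the pair (e, n).
def include_sort (string_list : List String) (reverse : Bool) : List String :=
  let element_list : List (String × Int) :=
    string_list.foldl (fun acc element =>
      let others := string_list.filter (fun _ele => _ele != element)
      let level := others.foldl (fun lv other =>
        if PySem.Str.isIn other element then lv + 1 else lv) (1 : Int)
      acc ++ [(element, level)]) []
  let sorted_list := PySem.List.sorted element_list (fun p => p.2) reverse
  sorted_list.map (fun p => p.1)

-- ===== PORT B =====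
def include_sort_alt (string_list : List String) (reverse : Bool) : List String :=
  let cnt : PySem.Dict String Int :=
    string_list.foldl (fun d s => d.insert s (d.getD s 0 + 1)) PySem.Dict.empty
  let level : PySem.Dict String Int :=
    cnt.keys.foldl (fun lv e =>
      let tot := cnt.items.foldl (fun t p =>
        if PySem.Str.isIn p.1 e then t + p.2 else t) (0 : Int)
      lv.insert e (1 + tot - cnt.getD e 0)) PySem.Dict.empty
  PySem.List.sorted string_list (fun s => level.getD s 0) reverse

-- ===== PRECONDITION & SPEC =====
def Spec_include_sort (string_list : List String) (reverse : Bool) (out : List String) : Prop := out = include_sort_alt string_list reverse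
instance (string_list : List String) (reverse : Bool) (out : List String) : Decidable (Spec_include_sort string_list reverse out) := by unfold Spec_include_sort; infer_instance

-- ===== CLAIM (what is proved, stated in full; the proofs are below) =====
def Claim_equal_include_sort : Prop := ∀ (string_list : List String) (reverse : Bool), Dom_include_sort string_list reverse → Spec_include_sort string_list reverse (include_sort string_list reverse)

-- ===== LEMMAS AND PROOFS =====

-- insertBy commutes with a map whose target comparison agrees through the map
theorem pv_map_insertBy {α β : Type} (f : α → β) (p : α → α → Bool) (q : β → β → Bool)
    (h : ∀ a b, q (f a) (f b) = p a b) (x : α) (ys : List α) :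
    (PySem.List.insertBy p x ys).map f = PySem.List.insertBy q (f x) (ys.map f) := by
  induction ys with
  | nil => simp [PySem.List.insertBy]
  | cons y t ih =>
    simp only [PySem.List.insertBy, List.map_cons, h]
    by_cases hp : p x y
    · simp [hp]
    · simp [hp, ih]

theorem pv_map_foldl_insertBy {α β : Type} (f : α → β) (p : α → α → Bool) (q : β → β → Bool)
    (h : ∀ a b, q (f a) (f b) = p a b) (xs : List α) (acc : List α) :
    (xs.foldl (fun acc x => PySem.List.insertBy p x acc) acc).map f
      = (xs.map f).foldl (fun acc b => PySem.List.insertBy q b acc) (acc.map f) := by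
  induction xs generalizing acc with
  | nil => simp
  | cons x t ih =>
    simp only [List.foldl_cons, List.map_cons, ih, pv_map_insertBy f p q h]

-- sorting (e, key e) pairs by the second component and projecting = sorting by key
theorem pv_sorted_pairs (xs : List String) (k : String → Int) (rev : Bool) :
    (PySem.List.sorted (xs.map (fun e => (e, k e))) (fun p => p.2) rev).map (fun p => p.1)
      = PySem.List.sorted xs k rev := by
  cases rev with
  | false =>
    have h := pv_map_foldl_insertBy (fun e => (e, k e))
        (fun a b => decide (k a < k b)) (fun a b => decide (a.2 < b.2)) (fun a b => rfl) xs []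
    simp only [List.map_nil] at h
    rw [PySem.List.sorted_eq_foldl_insertBy, PySem.List.sorted_eq_foldl_insertBy, ← h,
      List.map_map]
    simp [Function.comp_def]
  | true =>
    have h := pv_map_foldl_insertBy (fun e => (e, k e))
        (fun a b => decide (k b < k a)) (fun a b => decide (b.2 < a.2)) (fun a b => rfl) xs []
    simp only [List.map_nil] at h
    rw [PySem.List.sorted_rev_eq_foldl_insertBy, PySem.List.sorted_rev_eq_foldl_insertBy, ← h,
      List.map_map]
    simp [Function.comp_def]

-- a fold inserting (e, f e) for each key, looked up afterwards
theorem pv_getD_foldl_insert (ks : List String) (f : String → Int)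
    (d : PySem.Dict String Int) (s : String) (v : Int) :
    (ks.foldl (fun lv e => lv.insert e (f e)) d).getD s v
      = if s ∈ ks then f s else d.getD s v := by
  induction ks generalizing d with
  | nil => simp
  | cons kk t ih =>
    simp only [List.foldl_cons, ih, PySem.Dict.getD_insert, List.mem_cons]
    by_cases hs : s ∈ t
    · simp [hs]
    · by_cases he : s = kk <;> simp [hs, he]

-- countP over l as a sum of per-distinct-value counts
theorem pv_countP_eq_sum (l : List String) (p : String → Bool) :
    (((PySem.Set.ofList l).filter p).map (fun v => l.count v)).sum = l.countP p := by
  rw [← List.sum_map_count_dedup_filter_eq_countP p l]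
  apply List.Perm.sum_eq
  apply List.Perm.map
  apply (List.perm_ext_iff_of_nodup ((PySem.Set.nodup_ofList l).filter p) (l.nodup_dedup.filter p)).mpr
  intro x
  simp [List.mem_filter, PySem.Set.mem_ofList, List.mem_dedup, and_comm]

-- splitting countP of a predicate true at e into "others" plus the copies of e itself
theorem pv_countP_split (l : List String) (e : String) (p : String → Bool) (hp : p e = true) :
    l.countP p = (l.filter (fun v => v != e)).countP p + l.count e := by
  rw [List.countP_eq_countP_filter_add l p (fun v => v != e)]
  congr 1
  have hf : l.filter (fun v => !(v != e)) = l.filter (fun v => v == e) := by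
    apply List.filter_congr
    intro x _
    simp [bne]
  rw [hf, List.countP_filter]
  rw [List.count_eq_countP]
  apply List.countP_congr
  intro x _
  by_cases hx : x = e
  · simp [hx, hp]
  · simp [hx]

-- A's per-element level equals B's dict lookup, for elements of the list
theorem pv_level_eq (l : List String) (e : String) :
    (1 : Int) + ((l.filter (fun v => v != e)).countP (fun v => PySem.Str.isIn v e) : Int)
      = 1 + ((((PySem.Set.ofList l).filter (fun v => PySem.Str.isIn v e)).map
              (fun v => (l.count v : Int))).sum) - (l.count e : Int) := by
  have hee : PySem.Str.isIn e e = true := by rw [PySem.Str.isIn_iff_infix]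
  have hsplit := pv_countP_split l e (fun v => PySem.Str.isIn v e) hee
  have hsum : (((PySem.Set.ofList l).filter (fun v => PySem.Str.isIn v e)).map
      (fun v => (l.count v : Int))).sum
      = ((l.countP (fun v => PySem.Str.isIn v e) : Nat) : Int) := by
    rw [← pv_countP_eq_sum l (fun v => PySem.Str.isIn v e)]
    rw [Nat.cast_list_sum, List.map_map]
    rfl
  rw [hsum]
  omega

theorem include_sort_spec : Claim_equal_include_sort := by
  intro l rev _
  unfold Spec_include_sort include_sort include_sort_alt
  rw [PySem.Dict.foldl_insert_getD_add_one_eq_counter]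
  rw [PySem.List.foldl_append_singleton_eq_map
    (f := fun element => (element,
      (l.filter (fun _ele => _ele != element)).foldl (fun lv other =>
        if PySem.Str.isIn other element then lv + 1 else lv) (1 : Int)))]
  rw [List.nil_append]
  rw [List.map_congr_left (f := fun element => (element,
      (l.filter (fun _ele => _ele != element)).foldl (fun lv other =>
        if PySem.Str.isIn other element then lv + 1 else lv) (1 : Int)))
    (g := fun s => (s, ((PySem.Dict.counter l).keys.foldl (fun lv e =>
        lv.insert e (1 + (PySem.Dict.counter l).items.foldl (fun t p =>
          if PySem.Str.isIn p.1 e then t + p.2 else t) (0 : Int)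
          - (PySem.Dict.counter l).getD e 0)) PySem.Dict.empty).getD s 0))
    ?_]
  · exact pv_sorted_pairs l _ rev
  · intro e he
    simp only [Prod.mk.injEq, true_and]
    rw [PySem.List.foldl_if_add_one, pv_getD_foldl_insert]
    have hmem : e ∈ (PySem.Dict.counter l).keys := by
      rw [PySem.Dict.keys_counter]
      exact (PySem.Set.mem_ofList l e).mpr he
    rw [if_pos hmem, PySem.Dict.getD_counter, PySem.Dict.items_counter]
    rw [PySem.List.foldl_if_eq_foldl_filter (p := fun pr : String × Int => PySem.Str.isIn pr.1 e)
      (f := fun t (pr : String × Int) => t + pr.2), List.filter_map,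
      PySem.List.foldl_add, List.map_map, zero_add]
    exact pv_level_eq l e
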